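-- pv_equiv track=rewrite | github.com/SankalpC10/Leetcode | 4168-mirror-distance-of-an-integer/mirror-distance-of-an-integer.py | mirrorDistance
-- ===== SOURCE A (Python) =====
-- def mirrorDistance(n: int) -> int:
--     temp_n = n
--     rev = 0
--     while temp_n >0:
--         reminder = temp_n%10
--         rev = (rev*10)+reminder
--         temp_n = temp_n//10
--     return abs(rev-n)
-- ===== SOURCE B (Python) =====
-- def _rev_pow(n):
--     # returns (digit-reversal of n, 10**(number of digits of n)); (0, 1) for n <= 0
--     if n <= 0:
--         return (0, 1)
--     r, p = _rev_pow(n // 10)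
--     return (n % 10 * p + r, 10 * p)
--
-- def mirrorDistance(n: int) -> int:
--     return abs(_rev_pow(n)[0] - n)
-- ===== Notes on version B (the rewrite author's own statement) =====
-- stated objective: alternative
-- what changed: Replaces A's iterative least-significant-first shift-and-add accumulator loop with a structural recursion that returns the reversal paired with a power of ten and places each extracted digit directly at its final most-significant position.
import Mathlib
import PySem

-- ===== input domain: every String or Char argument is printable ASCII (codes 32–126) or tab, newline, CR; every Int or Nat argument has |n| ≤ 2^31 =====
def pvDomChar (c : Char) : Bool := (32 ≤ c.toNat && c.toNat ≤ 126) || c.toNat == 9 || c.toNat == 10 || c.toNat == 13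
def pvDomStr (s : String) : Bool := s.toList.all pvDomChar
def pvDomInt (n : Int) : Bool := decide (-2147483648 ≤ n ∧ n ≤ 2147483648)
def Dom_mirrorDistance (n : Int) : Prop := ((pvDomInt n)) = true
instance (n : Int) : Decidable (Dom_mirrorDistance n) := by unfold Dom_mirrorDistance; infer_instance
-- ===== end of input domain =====

-- B replaces A's iterative least-significant-first shift-and-add accumulator loop
-- with a structural recursion returning (reversal, 10^digit-count), placing each digit
-- at its final most-significant position; same cost, different decomposition.

theorem pv_floordiv_ten_lt (t : Int) (h : t > 0) :
    (PySem.Int.floordiv t 10).toNat < t.toNat := by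
  simp only [PySem.Int.floordiv]
  rw [Int.fdiv_eq_ediv_of_nonneg _ (by omega : (0:Int) ≤ 10)]
  omega

-- ===== PORT A =====
-- the while loop of A, state (temp_n, rev)
def mirrorLoop (temp_n rev : Int) : Int :=
  if temp_n > 0 then
    mirrorLoop (PySem.Int.floordiv temp_n 10) (rev * 10 + PySem.Int.mod temp_n 10)
  else rev
termination_by temp_n.toNat
decreasing_by exact pv_floordiv_ten_lt _ (by assumption)

def mirrorDistance (n : Int) : Int := |mirrorLoop n 0 - n|

-- ===== PORT B =====
-- _rev_pow of Source B: (digit-reversal of n, 10^(number of digits)); (0,1) for n ≤ 0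
def revPow (n : Int) : Int × Int :=
  if n ≤ 0 then (0, 1)
  else
    let rp := revPow (PySem.Int.floordiv n 10)
    (PySem.Int.mod n 10 * rp.2 + rp.1, 10 * rp.2)
termination_by n.toNat
decreasing_by exact pv_floordiv_ten_lt _ (by omega)

def mirrorDistance_alt (n : Int) : Int := |(revPow n).1 - n|

-- ===== PRECONDITION & SPEC =====
def Spec_mirrorDistance (n : Int) (out : Int) : Prop := out = mirrorDistance_alt n
instance (n : Int) (out : Int) : Decidable (Spec_mirrorDistance n out) := by unfold Spec_mirrorDistance; infer_instance

-- ===== CLAIM (what is proved, stated in full; the proofs are below) =====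
def Claim_equal_mirrorDistance : Prop := ∀ (n : Int), Dom_mirrorDistance n → Spec_mirrorDistance n (mirrorDistance n)

-- ===== LEMMAS AND PROOFS =====
-- A's loop, started at accumulator rev, computes rev shifted past t's digits plus t's reversal.
theorem mirrorLoop_eq_revPow (t rev : Int) :
    mirrorLoop t rev = rev * (revPow t).2 + (revPow t).1 := by
  induction t, rev using mirrorLoop.induct with
  | case1 t rev h ih =>
    rw [mirrorLoop, revPow]
    simp only [if_pos h, if_neg (by omega : ¬ t ≤ 0), ih]
    ring
  | case2 t rev h =>
    rw [mirrorLoop, revPow]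
    simp only [if_neg h, if_pos (by omega : t ≤ 0)]
    ring

-- ===== VERDICT (by name: the statement is the Claim_ definition above) =====
theorem mirrorDistance_spec : Claim_equal_mirrorDistance := by
  intro n _
  show mirrorDistance n = mirrorDistance_alt n
  unfold mirrorDistance mirrorDistance_alt
  rw [mirrorLoop_eq_revPow]
  ring_nf
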